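-- pv_equiv track=rewrite | github.com/PatrickRadu/DSA | EfficientAlghoritms/ListSplitting.py | counts_splits_Bf
-- ===== SOURCE A (Python) =====
-- def counts_splits_Bf(numbers):
--     n=len(numbers)
--     result=0
--     for i in range(n-1):
--         leftSum=sum(numbers[0:i+1])
--         rightSum=sum(numbers[i+1:])
--         if leftSum==rightSum:
--             result+=1
--     return result
-- ===== SOURCE B (Python) =====
-- def counts_splits_Bf(numbers):
--     total = sum(numbers)
--     left = 0
--     result = 0
--     for x in numbers[:-1]:
--         left += x
--         if 2 * left == total:
--             result += 1
--     return result
-- ===== Notes on version B (the rewrite author's own statement) =====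
-- stated objective: faster
-- what changed: Replaced the per-index re-summation of both slices by a single pass keeping a running prefix sum compared against the precomputed total.
import Mathlib
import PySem

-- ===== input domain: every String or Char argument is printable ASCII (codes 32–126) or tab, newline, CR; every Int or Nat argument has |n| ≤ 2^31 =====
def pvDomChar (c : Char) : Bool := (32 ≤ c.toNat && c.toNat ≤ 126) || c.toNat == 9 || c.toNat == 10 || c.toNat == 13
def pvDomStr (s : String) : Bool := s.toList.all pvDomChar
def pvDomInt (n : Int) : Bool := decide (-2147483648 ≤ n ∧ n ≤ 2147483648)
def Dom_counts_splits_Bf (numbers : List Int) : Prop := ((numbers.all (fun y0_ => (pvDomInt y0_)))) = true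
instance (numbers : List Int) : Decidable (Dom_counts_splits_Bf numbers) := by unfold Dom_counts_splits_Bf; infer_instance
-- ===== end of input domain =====

-- B replaces A's quadratic per-index re-summation of both slices by one pass with a
-- running prefix sum compared against the precomputed total (objective: faster).

-- ===== PORT A =====
def counts_splits_Bf (numbers : List Int) : Int :=
  let n : Int := numbers.length
  (PySem.List.pyRange 0 (n - 1) 1).foldl
    (fun result i =>
      let leftSum := (PySem.List.slice numbers (some 0) (some (i + 1))).sum
      let rightSum := (PySem.List.slice numbers (some (i + 1)) none).sum
      if leftSum = rightSum then result + 1 else result) 0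

-- ===== PORT B =====
def counts_splits_Bf_alt (numbers : List Int) : Int :=
  let total := numbers.sum
  let st := (PySem.List.slice numbers none (some (-1))).foldl
    (fun (st : Int × Int) x =>
      let left := st.1 + x
      (left, if 2 * left = total then st.2 + 1 else st.2)) (0, 0)
  st.2

-- ===== PRECONDITION & SPEC =====
def Spec_counts_splits_Bf (numbers : List Int) (out : Int) : Prop := out = counts_splits_Bf_alt numbers
instance (numbers : List Int) (out : Int) : Decidable (Spec_counts_splits_Bf numbers out) := by unfold Spec_counts_splits_Bf; infer_instance

-- ===== CLAIM (what is proved, stated in full; the proofs are below) =====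
def Claim_equal_counts_splits_Bf : Prop := ∀ (numbers : List Int), Dom_counts_splits_Bf numbers → Spec_counts_splits_Bf numbers (counts_splits_Bf numbers)

-- ===== LEMMAS AND PROOFS =====

-- B's fold with running prefix sum counts the prefixes whose doubled sum equals t.
theorem pv_fold_count (ys : List Int) : ∀ (t l0 r0 : Int),
    (ys.foldl (fun (st : Int × Int) x =>
        (st.1 + x, if 2 * (st.1 + x) = t then st.2 + 1 else st.2)) (l0, r0)).2
      = r0 + ((List.range ys.length).countP
          (fun k => decide (2 * (l0 + (ys.take (k + 1)).sum) = t)) : Int) := by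
  induction ys with
  | nil => simp
  | cons y ys ih =>
    intro t l0 r0
    rw [List.foldl_cons]
    simp only []
    rw [ih]
    have hr : List.range (ys.length + 1) = 0 :: (List.range ys.length).map Nat.succ :=
      List.range_succ_eq_map
    simp only [List.length_cons, hr, List.countP_cons, List.countP_map]
    have hcomp : ((fun k => decide (2 * (l0 + ((y :: ys).take (k + 1)).sum) = t)) ∘ Nat.succ)
        = fun k => decide (2 * (l0 + y + (ys.take (k + 1)).sum) = t) := by
      funext k
      simp only [Function.comp, List.take_succ_cons, List.sum_cons, ← add_assoc]
    rw [hcomp]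
    simp only [zero_add, List.take_succ_cons, List.take_zero, List.sum_cons, List.sum_nil,
      add_zero, decide_eq_true_eq]
    push_cast
    split_ifs with h <;> omega

theorem counts_splits_Bf_spec_aux (xs : List Int) :
    counts_splits_Bf xs = counts_splits_Bf_alt xs := by
  unfold counts_splits_Bf counts_splits_Bf_alt
  simp only [PySem.List.slice_to_neg_one]
  rw [pv_fold_count]
  -- A side: turn the pyRange fold into a countP over List.range
  have hm : ((xs.length : Int) - 1 - 0).toNat = xs.length - 1 := by omega
  rw [PySem.List.pyRange_one 0 ((xs.length : Int) - 1), hm]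
  rw [PySem.List.foldl_ite_add_one]
  rw [List.countP_map, List.length_dropLast]
  congr 2
  apply List.countP_congr
  intro k hk
  have hk' : k < xs.length - 1 := List.mem_range.mp hk
  have e1 : PySem.List.slice xs (some 0) (some ((k : Int) + 1)) = xs.take (k + 1) := by
    have h := PySem.List.slice_natCast xs 0 (k + 1)
    push_cast at h
    simpa using h
  have e2 : PySem.List.slice xs (some ((k : Int) + 1)) none = xs.drop (k + 1) := by
    have h := PySem.List.slice_from_natCast xs (k + 1)
    push_cast at h
    simpa using h
  have htake : xs.dropLast.take (k + 1) = xs.take (k + 1) := by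
    rw [List.dropLast_eq_take, List.take_take]
    congr 1
    omega
  have hsum : (xs.take (k + 1)).sum + (xs.drop (k + 1)).sum = xs.sum := by
    rw [← List.sum_append, List.take_append_drop]
  simp only [Function.comp, zero_add, e1, e2, htake]
  simp only [decide_eq_true_eq]
  omega

-- ===== VERDICT (by name: the statement is the Claim_ definition above) =====
theorem counts_splits_Bf_spec : Claim_equal_counts_splits_Bf := by
  intro numbers _
  exact counts_splits_Bf_spec_aux numbers
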